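-- pv_equiv track=rewrite | github.com/Jsakkos/microtools | Scripts/imgutils.py | get_dimorder
-- ===== SOURCE A (Python) =====
-- def get_dimorder(dimstring):
--     """Get the order of dimensions from dimension string
--
--     :param dimstring: string containing the dimensions
--     :type dimstring: str
--     :return: dims_dict - dictionary with the dimensions and its positions
--     :rtype: dict
--     :return: dimindex_list - list with indices of dimensions
--     :rtype: list
--     :return: numvalid_dims - number of valid dimensions
--     :rtype: integer
--     """
--
--     dimindex_list = []
--     dims = ['R', 'I', 'M', 'H', 'V', 'B', 'S', 'T', 'C', 'Z', 'Y', 'X', '0']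
--     dims_dict = {}
--
--     # loop over all dimensions and find the index
--     for d in dims:
--
--         dims_dict[d] = dimstring.find(d)
--         dimindex_list.append(dimstring.find(d))
--
--     # check if a dimension really exists
--     numvalid_dims = sum(i > 0 for i in dimindex_list)
--
--     return dims_dict, dimindex_list, numvalid_dims
-- ===== SOURCE B (Python) =====
-- def get_dimorder(dimstring):
--     """Get the order of dimensions from dimension string (single forward scan)."""
--     dims = ['R', 'I', 'M', 'H', 'V', 'B', 'S', 'T', 'C', 'Z', 'Y', 'X', '0']
--     dims_dict = {d: -1 for d in dims}
--     for i, c in enumerate(dimstring):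
--         if c in dims_dict and dims_dict[c] == -1:
--             dims_dict[c] = i
--     dimindex_list = [dims_dict[d] for d in dims]
--     numvalid_dims = sum(i > 0 for i in dimindex_list)
--     return dims_dict, dimindex_list, numvalid_dims
-- ===== Notes on version B (the rewrite author's own statement) =====
-- stated objective: alternative
-- what changed: Replaces thirteen separate dimstring.find(d) scans with one forward pass over the string that fills a first-occurrence position table initialized to -1, then reads the table in dims order.
import Mathlib
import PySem

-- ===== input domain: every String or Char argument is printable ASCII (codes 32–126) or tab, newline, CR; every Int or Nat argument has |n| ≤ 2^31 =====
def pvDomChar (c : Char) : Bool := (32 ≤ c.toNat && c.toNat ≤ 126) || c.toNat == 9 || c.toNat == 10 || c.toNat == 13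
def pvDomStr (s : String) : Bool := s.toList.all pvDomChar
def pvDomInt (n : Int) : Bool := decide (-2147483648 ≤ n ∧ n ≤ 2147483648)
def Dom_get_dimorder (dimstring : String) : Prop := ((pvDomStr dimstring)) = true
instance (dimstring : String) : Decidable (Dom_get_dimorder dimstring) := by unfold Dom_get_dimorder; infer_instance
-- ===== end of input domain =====

-- B replaces the 13 per-letter dimstring.find scans by a single forward scan of the
-- string that records first occurrences in a position table (alternative decomposition).


def pvDims : List String := ["R", "I", "M", "H", "V", "B", "S", "T", "C", "Z", "Y", "X", "0"]

-- ===== PORT A =====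
def get_dimorder (dimstring : String) : (List (String × Int)) × List Int × Int :=
  let st := pvDims.foldl
    (fun (st : PySem.Dict String Int × List Int) d =>
      (st.1.insert d (PySem.Str.find dimstring d), st.2 ++ [PySem.Str.find dimstring d]))
    (PySem.Dict.empty, [])
  let numvalid_dims := (st.2.map (fun i => if 0 < i then (1 : Int) else 0)).sum
  (st.1.items, st.2, numvalid_dims)

-- ===== PORT B =====
-- the single forward scan over enumerate(dimstring): record an index only the first time
def pvScan (ps : List (Int × Char)) (d : PySem.Dict String Int) : PySem.Dict String Int :=
  ps.foldl (fun d p =>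
    let k := String.ofList [p.2]
    if d.contains k && (d.getD k (-1) == -1) then d.insert k p.1 else d) d

def get_dimorder_alt (dimstring : String) : (List (String × Int)) × List Int × Int :=
  let d0 := pvDims.foldl (fun d k => d.insert k (-1)) (PySem.Dict.empty : PySem.Dict String Int)
  let dfin := pvScan (PySem.List.enumerate dimstring.toList) d0
  let dimindex_list := pvDims.map (fun k => dfin.getD k (-1))
  let numvalid_dims := (dimindex_list.map (fun i => if 0 < i then (1 : Int) else 0)).sum
  (dfin.items, dimindex_list, numvalid_dims)

-- ===== PRECONDITION & SPEC =====
def Spec_get_dimorder (dimstring : String) (out : (List (String × Int)) × List Int × Int) : Prop := out = get_dimorder_alt dimstring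
instance (dimstring : String) (out : (List (String × Int)) × List Int × Int) : Decidable (Spec_get_dimorder dimstring out) := by unfold Spec_get_dimorder; infer_instance

-- ===== CLAIM (what is proved, stated in full; the proofs are below) =====
def Claim_equal_get_dimorder : Prop := ∀ (dimstring : String), Dom_get_dimorder dimstring → Spec_get_dimorder dimstring (get_dimorder dimstring)

-- ===== LEMMAS AND PROOFS =====

-- first index ≥ i at which character c occurs in cs, else -1 (proof helper)
def pvFF (cs : List Char) (i : Int) (c : Char) : Int :=
  match cs with
  | [] => -1
  | x :: xs => if x = c then i else pvFF xs (i + 1) c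

theorem pvScan_keys (ps : List (Int × Char)) (d : PySem.Dict String Int) :
    (pvScan ps d).keys = d.keys := by
  induction ps generalizing d with
  | nil => rfl
  | cons p ps ih =>
    simp only [pvScan, List.foldl_cons] at *
    by_cases h : (d.contains (String.ofList [p.2]) && (d.getD (String.ofList [p.2]) (-1) == -1)) = true
    · rw [if_pos h, ih, PySem.Dict.keys_insert_of_contains _ _ ((Bool.and_eq_true _ _).mp h).1]
    · rw [if_neg h, ih]

theorem pvScan_get (cs : List Char) (i : Int) (hi : 0 ≤ i) (d : PySem.Dict String Int) (c : Char) :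
    (pvScan (PySem.List.enumerate cs i) d).get? (String.ofList [c]) =
      (d.get? (String.ofList [c])).map (fun v => if v = -1 then pvFF cs i c else v) := by
  induction cs generalizing i d with
  | nil =>
    simp only [PySem.List.enumerate_nil, pvScan, List.foldl_nil, pvFF]
    cases h : d.get? (String.ofList [c]) with
    | none => rfl
    | some v =>
      simp only [Option.map_some, Option.some.injEq]
      split_ifs with h1
      · omega
      · rfl
  | cons x xs ih =>
    rw [PySem.List.enumerate_cons]
    simp only [pvScan, List.foldl_cons] at *
    by_cases hx : x = c
    · subst hx
      cases hd : d.get? (String.ofList [x]) with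
      | none =>
        have hc : d.contains (String.ofList [x]) = false :=
          (PySem.Dict.get?_eq_none_iff_contains d _).mp hd
        rw [if_neg (by simp [hc])]
        rw [ih (i+1) (by omega) d, hd]
        rfl
      | some v =>
        have hc : d.contains (String.ofList [x]) = true := by
          rw [PySem.Dict.contains_eq_isSome_get?, hd]; rfl
        have hgD : d.getD (String.ofList [x]) (-1) = v :=
          PySem.Dict.getD_of_get?_eq_some d _ hd
        by_cases hv : v = -1
        · subst hv
          rw [if_pos (by simp [hc, hgD])]
          rw [ih (i+1) (by omega), PySem.Dict.get?_insert_self]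
          simp only [pvFF, Option.map_some, Option.some.injEq]
          split_ifs with h1 <;> omega
        · rw [if_neg (by simp [hc, hgD, hv])]
          rw [ih (i+1) (by omega), hd]
          simp [pvFF, hv]
    · have hkne : String.ofList [c] ≠ String.ofList [x] := by
        intro h; exact hx (by simpa using congrArg String.toList h.symm)
      have hstep : (if d.contains (String.ofList [x]) && (d.getD (String.ofList [x]) (-1) == -1)
            then d.insert (String.ofList [x]) i else d).get? (String.ofList [c]) =
          d.get? (String.ofList [c]) := by
        split_ifs with h
        · simp [PySem.Dict.get?_insert, hkne]
        · rfl
      rw [ih (i+1) (by omega), hstep]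
      simp [pvFF, hx]

theorem pvFF_not_mem (cs : List Char) (c : Char) (i : Int) (h : c ∉ cs) : pvFF cs i c = -1 := by
  induction cs generalizing i with
  | nil => rfl
  | cons x xs ih =>
    simp only [List.mem_cons, not_or] at h
    simp only [pvFF]
    rw [if_neg (fun hh : x = c => h.1 hh.symm)]
    exact ih (i+1) h.2

theorem pvSingletonPrefix (c : Char) (l : List Char) : [c] <+: l ↔ l[0]? = some c := by
  cases l with
  | nil => simp
  | cons x xs => simp [List.cons_prefix_iff]

theorem pvFF_spec (cs : List Char) (c : Char) (i : Int) (n : Nat)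
    (h1 : cs[n]? = some c) (h2 : ∀ m < n, cs[m]? ≠ some c) : pvFF cs i c = i + n := by
  induction cs generalizing i n with
  | nil => simp at h1
  | cons x xs ih =>
    by_cases hx : x = c
    · have hn : n = 0 := by
        by_contra h
        have := h2 0 (Nat.pos_of_ne_zero h)
        simp [hx] at this
      subst hn; subst hx; simp [pvFF]
    · have hn : n ≠ 0 := by
        rintro rfl; simp only [List.getElem?_cons_zero, Option.some.injEq] at h1
        exact hx h1
      obtain ⟨m, rfl⟩ := Nat.exists_eq_succ_of_ne_zero hn
      simp only [pvFF, if_neg hx]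
      rw [ih (i+1) m (by simpa using h1) (fun j hj => by simpa using h2 (j+1) (by omega))]
      push_cast; ring

theorem pvFF_eq_find (cs : List Char) (c : Char) :
    pvFF cs 0 c = PySem.Chars.find cs [c] := by
  by_cases hm : c ∈ cs
  · have hinf : [c] <:+: cs := by
      obtain ⟨s, t, rfl⟩ := List.append_of_mem hm
      exact ⟨s, t, by simp⟩
    have hf : 0 ≤ PySem.Chars.find cs [c] := (PySem.Chars.find_nonneg_iff cs [c]).mpr hinf
    obtain ⟨hpre, hmin⟩ := PySem.Chars.find_spec hf
    have h1 : cs[(PySem.Chars.find cs [c]).toNat]? = some c := by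
      rw [← List.head?_drop]
      have := (pvSingletonPrefix c (cs.drop (PySem.Chars.find cs [c]).toNat)).mp hpre
      simpa [List.head?_eq_getElem?] using this
    have h2 : ∀ m < (PySem.Chars.find cs [c]).toNat, cs[m]? ≠ some c := by
      intro m hm' hc
      exact hmin m hm' ((pvSingletonPrefix c _).mpr
        (by rw [← List.head?_drop] at hc; simpa [List.head?_eq_getElem?] using hc))
    rw [pvFF_spec cs c 0 _ h1 h2]
    omega
  · have hninf : ¬ [c] <:+: cs := fun h => hm (List.singleton_sublist.mp h.sublist)
    rw [(PySem.Chars.find_eq_neg_one_iff cs [c]).mpr hninf]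
    exact pvFF_not_mem cs c 0 hm

theorem pvFinal_getD (s : String) (c : Char)
    (h : ((pvDims.foldl (fun d k => d.insert k (-1))
        (PySem.Dict.empty : PySem.Dict String Int)).get? (String.ofList [c])) = some (-1)) :
    (pvScan (PySem.List.enumerate s.toList)
        (pvDims.foldl (fun d k => d.insert k (-1)) (PySem.Dict.empty : PySem.Dict String Int))).getD
      (String.ofList [c]) (-1) = PySem.Chars.find s.toList [c] := by
  have hg := pvScan_get s.toList 0 le_rfl
      (pvDims.foldl (fun d k => d.insert k (-1)) (PySem.Dict.empty : PySem.Dict String Int)) c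
  rw [h] at hg
  simp only [Option.map_some, pvFF_eq_find] at hg
  exact PySem.Dict.getD_of_get?_eq_some _ _ hg

-- ===== VERDICT (by name: the statement is the Claim_ definition above) =====
theorem get_dimorder_spec : Claim_equal_get_dimorder := by
  intro s _
  unfold Spec_get_dimorder get_dimorder get_dimorder_alt
  have hkeys : (pvScan (PySem.List.enumerate s.toList)
        (pvDims.foldl (fun d k => d.insert k (-1)) (PySem.Dict.empty : PySem.Dict String Int))).keys
      = pvDims := by
    rw [pvScan_keys]; decide
  have hitems := PySem.Dict.items_eq_map_keys
      (pvScan (PySem.List.enumerate s.toList)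
        (pvDims.foldl (fun d k => d.insert k (-1)) (PySem.Dict.empty : PySem.Dict String Int)))
      (by rw [hkeys]; decide) (-1)
  rw [hkeys] at hitems
  have hR := pvFinal_getD s 'R' (by decide)
  have hI := pvFinal_getD s 'I' (by decide)
  have hM := pvFinal_getD s 'M' (by decide)
  have hH := pvFinal_getD s 'H' (by decide)
  have hV := pvFinal_getD s 'V' (by decide)
  have hB := pvFinal_getD s 'B' (by decide)
  have hS := pvFinal_getD s 'S' (by decide)
  have hT := pvFinal_getD s 'T' (by decide)
  have hC := pvFinal_getD s 'C' (by decide)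
  have hZ := pvFinal_getD s 'Z' (by decide)
  have hY := pvFinal_getD s 'Y' (by decide)
  have hX := pvFinal_getD s 'X' (by decide)
  have h0 := pvFinal_getD s '0' (by decide)
  simp only [pvDims, List.foldl_cons, List.foldl_nil, List.map_cons, List.map_nil] at hitems hR hI hM hH hV hB hS hT hC hZ hY hX h0 ⊢
  rw [hitems]
  simp only [show "R" = String.ofList ['R'] from rfl, show "I" = String.ofList ['I'] from rfl,
    show "M" = String.ofList ['M'] from rfl, show "H" = String.ofList ['H'] from rfl,
    show "V" = String.ofList ['V'] from rfl, show "B" = String.ofList ['B'] from rfl,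
    show "S" = String.ofList ['S'] from rfl, show "T" = String.ofList ['T'] from rfl,
    show "C" = String.ofList ['C'] from rfl, show "Z" = String.ofList ['Z'] from rfl,
    show "Y" = String.ofList ['Y'] from rfl, show "X" = String.ofList ['X'] from rfl,
    show "0" = String.ofList ['0'] from rfl] at *
  rw [hR, hI, hM, hH, hV, hB, hS, hT, hC, hZ, hY, hX, h0]
  simp only [PySem.Str.find_eq, show (String.ofList ['R']).toList = ['R'] from rfl,
    show (String.ofList ['I']).toList = ['I'] from rfl,
    show (String.ofList ['M']).toList = ['M'] from rfl,
    show (String.ofList ['H']).toList = ['H'] from rfl,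
    show (String.ofList ['V']).toList = ['V'] from rfl,
    show (String.ofList ['B']).toList = ['B'] from rfl,
    show (String.ofList ['S']).toList = ['S'] from rfl,
    show (String.ofList ['T']).toList = ['T'] from rfl,
    show (String.ofList ['C']).toList = ['C'] from rfl,
    show (String.ofList ['Z']).toList = ['Z'] from rfl,
    show (String.ofList ['Y']).toList = ['Y'] from rfl,
    show (String.ofList ['X']).toList = ['X'] from rfl,
    show (String.ofList ['0']).toList = ['0'] from rfl]
  simp [PySem.Dict.items_insert_of_not_contains, PySem.Dict.contains_insert,
    PySem.Dict.empty]
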